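-- pv_equiv track=rewrite | github.com/pradeep1018/CS522-Assignments | midsem-q1.py | preprocess_words
-- ===== SOURCE A (Python) =====
-- def preprocess_words(x):
--     # splits by sentence
--     x = x.split('.')
--
--     # removes space
--     y = []
--     for i in x:
--         y.append(i.split(' '))
--
--     # removes \n
--     k = []
--     for i in y:
--         l = []
--         for j in i:
--             l.extend(j.split('\n'))
--         k.append(l)
--     y = k
--
--     # removes ,
--     k = []
--     for i in y:
--         l = []
--         for j in i:
--             l.extend(j.split(','))
--         k.append(l)
--     y = k
--
--     # removes ?
--     k = []
--     for i in y:
--         l = []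
--         for j in i:
--             l.extend(j.split('?'))
--         k.append(l)
--     y = k
--
--     # removes empty strings
--     k = []
--     for i in y:
--         l = []
--         for j in i:
--             if len(j) > 0:
--                 l.append(j.lower())
--         if len(l) > 0:
--             k.append(l)
--
--     return k
-- ===== SOURCE B (Python) =====
-- def preprocess_words(x):
--     # single-pass scanner: one traversal of x, maintaining sentence/word accumulators
--     result = []
--     sentence = []
--     word = []
--     for c in x:
--         if c == '.':
--             if word:
--                 sentence.append(''.join(word).lower())
--                 word = []
--             if sentence:
--                 result.append(sentence)
--                 sentence = []
--         elif c in ' \n,?':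
--             if word:
--                 sentence.append(''.join(word).lower())
--                 word = []
--         else:
--             word.append(c)
--     if word:
--         sentence.append(''.join(word).lower())
--     if sentence:
--         result.append(sentence)
--     return result
-- ===== Notes on version B (the rewrite author's own statement) =====
-- stated objective: alternative
-- what changed: A's six sequential split/extend/filter passes over intermediate lists of strings are replaced by a single left-to-right character scan that maintains a current-word buffer and current-sentence list and flushes them on delimiters.
import Mathlib
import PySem

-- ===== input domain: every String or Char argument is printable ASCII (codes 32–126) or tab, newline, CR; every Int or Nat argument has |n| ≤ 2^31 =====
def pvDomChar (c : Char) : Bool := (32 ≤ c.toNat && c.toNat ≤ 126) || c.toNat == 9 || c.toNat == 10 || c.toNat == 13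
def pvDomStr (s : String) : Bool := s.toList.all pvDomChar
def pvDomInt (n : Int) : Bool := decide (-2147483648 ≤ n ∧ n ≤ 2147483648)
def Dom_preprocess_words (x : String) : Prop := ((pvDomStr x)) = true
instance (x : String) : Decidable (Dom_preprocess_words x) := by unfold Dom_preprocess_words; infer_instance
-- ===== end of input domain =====

-- B replaces A's six sequential split/extend/filter passes by a single character scan
-- maintaining word/sentence accumulators (objective: alternative decomposition, same asymptotic cost).


-- ===== PORT A =====
-- str.split(sep) with a nonempty literal sep never raises; .getD [] is never taken.
def preprocess_words (x : String) : List (List String) :=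
  -- splits by sentence
  let x1 : List String := (PySem.Str.split? x ".").getD []
  -- removes space
  let y : List (List String) := x1.foldl (fun y i => y ++ [(PySem.Str.split? i " ").getD []]) []
  -- removes \n
  let y : List (List String) := y.foldl (fun k i =>
    k ++ [i.foldl (fun l j => l ++ (PySem.Str.split? j "\n").getD []) []]) []
  -- removes ,
  let y : List (List String) := y.foldl (fun k i =>
    k ++ [i.foldl (fun l j => l ++ (PySem.Str.split? j ",").getD []) []]) []
  -- removes ?
  let y : List (List String) := y.foldl (fun k i =>
    k ++ [i.foldl (fun l j => l ++ (PySem.Str.split? j "?").getD []) []]) []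
  -- removes empty strings
  y.foldl (fun k i =>
    let l : List String := i.foldl (fun l j => if PySem.Str.len j > 0 then l ++ [PySem.Str.lower j] else l) []
    if 0 < l.length then k ++ [l] else k) []

-- ===== PORT B =====
-- scanner state: (result, current sentence, current word buffer)
def pvStep (st : List (List String) × List String × List Char) (c : Char) :
    List (List String) × List String × List Char :=
  let r := st.1
  let s := st.2.1
  let w := st.2.2
  if c = '.' then
    let s := if w ≠ [] then s ++ [String.ofList (PySem.Chars.lower w)] else s
    if s ≠ [] then (r ++ [s], [], []) else (r, [], [])
  else if c = ' ' ∨ c = '\n' ∨ c = ',' ∨ c = '?' then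
    if w ≠ [] then (r, s ++ [String.ofList (PySem.Chars.lower w)], []) else (r, s, [])
  else (r, s, w ++ [c])

def preprocess_words_alt (x : String) : List (List String) :=
  let st := x.toList.foldl pvStep ([], [], [])
  let s := if st.2.2 ≠ [] then st.2.1 ++ [String.ofList (PySem.Chars.lower st.2.2)] else st.2.1
  if s ≠ [] then st.1 ++ [s] else st.1

-- ===== PRECONDITION & SPEC =====
def Spec_preprocess_words (x : String) (out : List (List String)) : Prop := out = preprocess_words_alt x
instance (x : String) (out : List (List String)) : Decidable (Spec_preprocess_words x out) := by unfold Spec_preprocess_words; infer_instance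

-- ===== CLAIM (what is proved, stated in full; the proofs are below) =====
def Claim_equal_preprocess_words : Prop := ∀ (x : String), Dom_preprocess_words x → Spec_preprocess_words x (preprocess_words x)

-- ===== LEMMAS AND PROOFS =====

-- split on a Boolean delimiter predicate (the common spec both ports are reduced to)
def pvSplitP (p : Char → Bool) : List Char → List (List Char)
  | [] => [[]]
  | a :: r =>
    if p a then [] :: pvSplitP p r
    else
      match pvSplitP p r with
      | [] => [[a]]      -- unreachable: pvSplitP never returns []
      | h :: t => (a :: h) :: t

def pvDot (c : Char) : Bool := c == '.'
def pvWs (c : Char) : Bool := ((c == ' ' || c == '\n') || c == ',') || c == '?'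

def pvWordsOf (s : List Char) : List String :=
  ((pvSplitP pvWs s).filter (fun w => !w.isEmpty)).map (fun w => String.ofList (PySem.Chars.lower w))

def pvSents (cs : List Char) : List (List String) :=
  ((pvSplitP pvDot cs).map pvWordsOf).filter (fun l => !l.isEmpty)

theorem pvSplitP_ne_nil (p : Char → Bool) (s : List Char) : pvSplitP p s ≠ [] := by
  cases s with
  | nil => simp [pvSplitP]
  | cons a r =>
    simp only [pvSplitP]
    split
    · simp
    · cases h : pvSplitP p r <;> simp

-- characterization of PySem.Chars.splitOn for a single-character separator
theorem pvGo_single (c : Char) (fuel : Nat) (l cur : List Char) (acc : List (List Char)) (h : l.length < fuel) :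
    PySem.Chars.splitOn.go [c] fuel l cur acc =
      acc.reverse ++ ((cur.reverse ++ (pvSplitP (· == c) l).headI) :: (pvSplitP (· == c) l).tail) := by
  induction fuel generalizing l cur acc with
  | zero => omega
  | succ fuel ih =>
    cases l with
    | nil => simp [PySem.Chars.splitOn.go, pvSplitP]
    | cons a rest =>
      by_cases hc : a = c
      · subst hc
        have hpre : List.isPrefixOf [a] (a :: rest) = true := by simp [List.isPrefixOf]
        simp only [PySem.Chars.splitOn.go, hpre, if_pos]
        have hdrop : List.drop [a].length (a :: rest) = rest := rfl
        rw [hdrop, ih rest [] ((cur.reverse) :: acc) (by simpa using Nat.lt_of_succ_lt_succ h)]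
        cases hsr : pvSplitP (· == a) rest with
        | nil => exact absurd hsr (pvSplitP_ne_nil _ _)
        | cons hh tt => simp [pvSplitP, hsr]
      · have hpre : List.isPrefixOf [c] (a :: rest) = false := by
          simp [List.isPrefixOf]; exact fun hh => absurd hh.symm hc
        simp only [PySem.Chars.splitOn.go, hpre]
        rw [ih rest (a :: cur) acc (by simpa using Nat.lt_of_succ_lt_succ h)]
        have hne := pvSplitP_ne_nil (· == c) rest
        simp only [pvSplitP, beq_iff_eq, hc, ite_false]
        cases hsp : pvSplitP (· == c) rest with
        | nil => exact absurd hsp hne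
        | cons hh tt => simp

theorem pvSplitOn_single (c : Char) (s : List Char) :
    PySem.Chars.splitOn s [c] = pvSplitP (· == c) s := by
  unfold PySem.Chars.splitOn
  rw [pvGo_single c (s.length + 1) s [] [] (by omega)]
  have hne := pvSplitP_ne_nil (· == c) s
  cases hsp : pvSplitP (· == c) s with
  | nil => exact absurd hsp hne
  | cons hh tt => simp

-- merging two sequential split passes into one predicate
theorem pvSplitP_flatMap (p q : Char → Bool) (s : List Char) :
    (pvSplitP p s).flatMap (pvSplitP q) = pvSplitP (fun c => p c || q c) s := by
  induction s with
  | nil => simp [pvSplitP]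
  | cons a r ih =>
    by_cases hp : p a = true
    · simp only [pvSplitP, hp, if_pos, Bool.true_or]
      simp [List.flatMap_cons, pvSplitP, ih]
    · have hp' : p a = false := by revert hp; cases p a <;> simp
      by_cases hq : q a = true
      · simp only [pvSplitP, hp', Bool.false_or, hq, if_pos, ite_false, Bool.false_eq_true]
        cases hsp : pvSplitP p r with
        | nil => exact absurd hsp (pvSplitP_ne_nil p r)
        | cons h t =>
          rw [hsp] at ih
          simp only [List.flatMap_cons] at ih ⊢
          simp only [pvSplitP, hq, if_pos]
          rw [← ih]
          simp
      · have hq' : q a = false := by revert hq; cases q a <;> simp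
        simp only [pvSplitP, hp', hq', Bool.false_or, ite_false, Bool.false_eq_true]
        cases hsp : pvSplitP p r with
        | nil => exact absurd hsp (pvSplitP_ne_nil p r)
        | cons h t =>
          rw [hsp] at ih
          simp only [List.flatMap_cons] at ih ⊢
          simp only [pvSplitP, hq', ite_false, Bool.false_eq_true]
          cases hsq : pvSplitP q h with
          | nil => exact absurd hsq (pvSplitP_ne_nil q h)
          | cons hh tt =>
            rw [hsq] at ih
            cases hix : pvSplitP (fun c => p c || q c) r with
            | nil => exact absurd hix (pvSplitP_ne_nil _ r)
            | cons ih1 it =>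
              rw [hix] at ih
              have : hh :: (tt ++ t.flatMap (pvSplitP q)) = ih1 :: it := by simpa using ih
              simp only [List.cons.injEq] at this
              simp [this.1, this.2]

-- a delimiter-free block prepends onto the first piece
theorem pvSplitP_nodelim_append (p : Char → Bool) (u w : List Char) (hu : ∀ a ∈ u, p a = false) :
    pvSplitP p (u ++ w) = (u ++ (pvSplitP p w).headI) :: (pvSplitP p w).tail := by
  induction u with
  | nil =>
    cases hsp : pvSplitP p w with
    | nil => exact absurd hsp (pvSplitP_ne_nil p w)
    | cons h t => simp [hsp]
  | cons a u ih =>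
    have ha : p a = false := hu a (by simp)
    have ih' := ih (fun b hb => hu b (by simp [hb]))
    simp only [List.cons_append, pvSplitP, ha, ite_false, Bool.false_eq_true]
    rw [ih']

theorem pvWordsOf_nodelim (u : List Char) (hu : ∀ a ∈ u, pvWs a = false) :
    pvWordsOf u = if u = [] then [] else [String.ofList (PySem.Chars.lower u)] := by
  have h3 := pvSplitP_nodelim_append pvWs u [] hu
  simp only [List.append_nil, pvSplitP, List.headI, List.tail] at h3
  unfold pvWordsOf
  rw [h3]
  cases u <;> simp

theorem pvWordsOf_split (c : Char) (u v : List Char) (hc : pvWs c = true)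
    (hu : ∀ a ∈ u, pvWs a = false) :
    pvWordsOf (u ++ c :: v) = pvWordsOf u ++ pvWordsOf v := by
  have h1 : pvSplitP pvWs (c :: v) = [] :: pvSplitP pvWs v := by simp [pvSplitP, hc]
  have h2 := pvSplitP_nodelim_append pvWs u (c :: v) hu
  rw [h1] at h2
  simp only [List.headI, List.tail, List.append_nil] at h2
  rw [pvWordsOf_nodelim u hu]
  unfold pvWordsOf
  rw [h2]
  simp only [List.filter_cons]
  by_cases hu0 : u = []
  · subst hu0; simp
  · simp [hu0]

-- B's finalization and the spec of what the scanner still owes for a suffix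
def pvFin (st : List (List String) × List String × List Char) : List (List String) :=
  let s := if st.2.2 ≠ [] then st.2.1 ++ [String.ofList (PySem.Chars.lower st.2.2)] else st.2.1
  if s ≠ [] then st.1 ++ [s] else st.1

def pvCollect (sent : List String) (word : List Char) (pieces : List (List Char)) : List (List String) :=
  match pieces with
  | [] => []
  | h :: t => ((sent ++ pvWordsOf (word ++ h)) :: t.map pvWordsOf).filter (fun l => !l.isEmpty)

theorem pvScan_invariant (cs : List Char) (acc : List (List String)) (sent : List String)
    (word : List Char) (hw : ∀ a ∈ word, pvWs a = false ∧ pvDot a = false) :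
    pvFin (cs.foldl pvStep (acc, sent, word)) = acc ++ pvCollect sent word (pvSplitP pvDot cs) := by
  induction cs generalizing acc sent word with
  | nil =>
    simp only [List.foldl_nil, pvFin, pvSplitP, pvCollect, List.map_nil, List.filter_cons,
      List.filter_nil, List.append_nil]
    rw [pvWordsOf_nodelim word (fun a ha => (hw a ha).1)]
    by_cases hword : word = []
    · subst hword
      simp only [ne_eq, not_true_eq_false, ite_false]
      by_cases hsent : sent = [] <;> simp [hsent]
    · simp [hword]
  | cons c rest ih =>
    have hw1 : ∀ a ∈ word, pvWs a = false := fun a ha => (hw a ha).1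
    have hX : (if word ≠ [] then sent ++ [String.ofList (PySem.Chars.lower word)] else sent) =
        sent ++ pvWordsOf word := by
      rw [pvWordsOf_nodelim word hw1]
      by_cases hword : word = [] <;> simp [hword]
    by_cases hdot : c = '.'
    · subst hdot
      have hsp : pvSplitP pvDot ('.' :: rest) = [] :: pvSplitP pvDot rest := by
        simp [pvSplitP, pvDot]
      rw [hsp]
      simp only [List.foldl_cons, pvStep, reduceIte]
      rw [hX]
      have hrec : ∀ acc' : List (List String),
          pvFin (List.foldl pvStep (acc', [], []) rest) = acc' ++ pvCollect [] [] (pvSplitP pvDot rest) :=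
        fun acc' => ih acc' [] [] (by intro a ha; simp at ha)
      by_cases hXe : sent ++ pvWordsOf word = []
      · rw [if_neg (by simp [hXe]), hrec acc]
        cases hsr : pvSplitP pvDot rest with
        | nil => exact absurd hsr (pvSplitP_ne_nil _ _)
        | cons h t => simp [pvCollect, hXe, List.filter_cons]
      · rw [if_pos hXe, hrec (acc ++ [sent ++ pvWordsOf word])]
        cases hsr : pvSplitP pvDot rest with
        | nil => exact absurd hsr (pvSplitP_ne_nil _ _)
        | cons h t => simp [pvCollect, hXe, List.filter_cons]
    · have hsp : pvSplitP pvDot (c :: rest) =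
          (c :: (pvSplitP pvDot rest).headI) :: (pvSplitP pvDot rest).tail := by
        have := pvSplitP_nodelim_append pvDot [c] rest
          (by intro a ha; simp at ha; subst ha; simp [pvDot]; exact hdot)
        simpa using this
      rw [hsp]
      by_cases hcs : (c = ' ' ∨ c = '\n' ∨ c = ',' ∨ c = '?')
      · have hws : pvWs c = true := by
          rcases hcs with h | h | h | h <;> simp [pvWs, h]
        simp only [List.foldl_cons, pvStep, if_neg hdot, if_pos hcs]
        have hstate : (if word ≠ [] then
              (acc, sent ++ [String.ofList (PySem.Chars.lower word)], ([] : List Char))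
            else (acc, sent, ([] : List Char))) = (acc, sent ++ pvWordsOf word, ([] : List Char)) := by
          rw [pvWordsOf_nodelim word hw1]
          by_cases hword : word = [] <;> simp [hword]
        rw [hstate, ih acc (sent ++ pvWordsOf word) [] (by intro a ha; simp at ha)]
        cases hsr : pvSplitP pvDot rest with
        | nil => exact absurd hsr (pvSplitP_ne_nil _ _)
        | cons h t =>
          simp only [pvCollect, List.headI, List.tail, List.nil_append]
          rw [pvWordsOf_split c word h hws hw1]
          simp [List.append_assoc]
      · simp only [List.foldl_cons, pvStep, if_neg hdot, if_neg hcs]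
        rw [ih acc sent (word ++ [c]) (by
          intro a ha
          rcases List.mem_append.mp ha with ha | ha
          · exact hw a ha
          · simp at ha; subst ha
            constructor
            · simp only [pvWs, Bool.or_eq_false_iff, beq_eq_false_iff_ne, ne_eq]
              push_neg
              refine ⟨⟨⟨?_, ?_⟩, ?_⟩, ?_⟩ <;> intro h <;> exact hcs (by simp [h])
            · simp [pvDot]; exact hdot)]
        cases hsr : pvSplitP pvDot rest with
        | nil => exact absurd hsr (pvSplitP_ne_nil _ _)
        | cons h t => simp [pvCollect, List.append_assoc]

theorem pvAlt_eq_sents (x : String) : preprocess_words_alt x = pvSents x.toList := by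
  have h := pvScan_invariant x.toList [] [] [] (by intro a ha; simp at ha)
  unfold preprocess_words_alt
  simp only [pvFin] at h
  simp only [h, List.nil_append]
  unfold pvSents
  cases hsp : pvSplitP pvDot x.toList with
  | nil => exact absurd hsp (pvSplitP_ne_nil _ _)
  | cons hh tt => simp [pvCollect]

-- the split?-getD plumbing of port A, at the Chars level
theorem pvSplitStr (s sep : String) (c : Char) (h : sep.toList = [c]) :
    (PySem.Str.split? s sep).getD [] =
      (pvSplitP (· == c) s.toList).map String.ofList := by
  simp [PySem.Str.split?, PySem.Chars.split?, h, pvSplitOn_single]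

theorem pvLower_ofList (w : List Char) :
    PySem.Str.lower (String.ofList w) = String.ofList (PySem.Chars.lower w) := by
  apply String.toList_inj.mp
  simp [PySem.Str.toList_lower]

-- one word-level split pass of A, over a list of (wrapped) char lists
theorem pvPass (L : List (List Char)) (sep : String) (c : Char) (h : sep.toList = [c]) :
    (L.map String.ofList).flatMap (fun j => (PySem.Str.split? j sep).getD []) =
      (L.flatMap (pvSplitP (· == c))).map String.ofList := by
  simp [pvSplitStr _ sep c h, List.flatMap_map, List.map_flatMap]

-- A's final word filter over one sentence
theorem pvInner (L : List (List Char)) (acc : List String) :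
    (L.map String.ofList).foldl
        (fun l j => if PySem.Str.len j > 0 then l ++ [PySem.Str.lower j] else l) acc =
      acc ++ (L.filter (fun w => !w.isEmpty)).map (fun w => String.ofList (PySem.Chars.lower w)) := by
  induction L generalizing acc with
  | nil => simp
  | cons h t ih =>
    simp only [List.map_cons, List.foldl_cons, List.filter_cons]
    by_cases hh : h = []
    · subst hh
      have hneg : ¬ (PySem.Str.len (String.ofList ([] : List Char)) > 0) := by
        simp [PySem.Str.len_eq]
      rw [if_neg hneg, ih]
      simp
    · have hpos : PySem.Str.len (String.ofList h) > 0 := by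
        simp only [PySem.Str.len_eq, String.toList_ofList]
        exact_mod_cast List.length_pos_iff.mpr hh
      rw [if_pos hpos, ih]
      simp [pvLower_ofList, hh]

-- A's final sentence filter
theorem pvOuter (L : List (List String)) (acc : List (List String)) :
    L.foldl (fun k i =>
        if 0 < (i.foldl (fun l j => if PySem.Str.len j > 0 then l ++ [PySem.Str.lower j] else l) []).length
        then k ++ [i.foldl (fun l j => if PySem.Str.len j > 0 then l ++ [PySem.Str.lower j] else l) []]
        else k) acc =
      acc ++ (L.map (fun i => i.foldl
          (fun l j => if PySem.Str.len j > 0 then l ++ [PySem.Str.lower j] else l) [])).filter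
        (fun l => !l.isEmpty) := by
  induction L generalizing acc with
  | nil => simp
  | cons h t ih =>
    simp only [List.foldl_cons, List.map_cons, List.filter_cons]
    generalize List.foldl (fun l j => if PySem.Str.len j > 0 then l ++ [PySem.Str.lower j] else l) [] h = v
    rw [ih]
    by_cases hv : v = []
    · subst hv; simp
    · have hpos : 0 < v.length := List.length_pos_iff.mpr hv
      simp [hpos, hv]

theorem pvA_eq_sents (x : String) : preprocess_words x = pvSents x.toList := by
  unfold preprocess_words
  simp only [PySem.List.foldl_append_singleton_eq_map, PySem.List.foldl_append_eq_flatMap,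
    List.nil_append, List.map_map]
  rw [pvSplitStr x "." '.' (by decide), List.map_map]
  rw [List.map_congr_left (l := pvSplitP (· == '.') x.toList)
    (g := fun s => List.map String.ofList (pvSplitP pvWs s)) (fun s _ => by
      simp only [Function.comp_apply]
      rw [pvSplitStr _ " " ' ' (by decide)]
      simp only [String.toList_ofList]
      rw [pvPass _ "\n" '\n' (by decide), pvPass _ "," ',' (by decide),
        pvPass _ "?" '?' (by decide)]
      rw [pvSplitP_flatMap, pvSplitP_flatMap, pvSplitP_flatMap]
      rfl)]
  rw [pvOuter, List.map_map]
  rw [List.map_congr_left (g := pvWordsOf) (fun s _ => by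
      simp only [Function.comp_apply]
      rw [pvInner]
      simp [pvWordsOf])]
  rfl

-- ===== VERDICT (by name: the statement is the Claim_ definition above) =====
theorem preprocess_words_spec : Claim_equal_preprocess_words := by
  intro x _
  unfold Spec_preprocess_words
  rw [pvA_eq_sents, pvAlt_eq_sents]
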